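-- pv_equiv track=rewrite | github.com/djeada/Algorithms-And-Data-Structures | src/dynamic_programming/python/best_sum/src/best_sum.py | find_shortest_combination_sum_memo
-- ===== SOURCE A (Python) =====
-- from typing import List, Optional
--
-- def find_shortest_combination_sum_memo(
--     target: int, numbers: List[int]
-- ) -> Optional[List[int]]:
--     """
--     Find the shortest combination of numbers that add up to target.
--
--     Uses memoization for efficient computation.
--
--     Args:
--         target: The target sum to achieve.
--         numbers: List of numbers that can be used (can be reused).
--
--     Returns:
--         Shortest list of numbers that sum to target, or None if impossible.
--     """
--
--     def recurse(target: int, memo: dict) -> float: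
--         if target in memo:
--             return memo[target]
--
--         if target < 0:
--             return float("inf")
--
--         if target == 0:
--             return 0
--
--         min_length = float("inf")
--         for number in numbers:
--             combination_length = recurse(target - number, memo) + 1
--             min_length = min(min_length, combination_length)
--
--         memo[target] = min_length
--         return min_length
--
--     memo: dict = {}
--     min_length = recurse(target, memo)
--     if min_length == float("inf"):
--         return None
--
--     combination: List[int] = []
--     while target > 0:
--         for number in numbers:
--             if recurse(target - number, memo) == min_length - 1:
--                 combination.append(number)
--                 target -= number
--                 min_length -= 1
--                 break
--
--     return combination
-- ===== SOURCE B (Python) =====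
-- from typing import List, Optional
--
--
-- def find_shortest_combination_sum_memo(
--     target: int, numbers: List[int]
-- ) -> Optional[List[int]]:
--     """Bottom-up tabulation: forward-fill shortest lengths with parent
--     pointers for 0..target, then walk the parents to rebuild the list."""
--     if target < 0:
--         return None
--     length: List[Optional[int]] = [0] + [None] * target
--     parent: List[int] = [0] * (target + 1)
--     for t in range(1, target + 1):
--         best: Optional[int] = None
--         for num in numbers:
--             s = t - num
--             if 0 <= s < t and length[s] is not None:
--                 if best is None or length[s] < best:
--                     best = length[s]
--                     parent[t] = num
--         if best is not None:
--             length[t] = best + 1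
--     if length[target] is None:
--         return None
--     combination: List[int] = []
--     t = target
--     while t > 0:
--         combination.append(parent[t])
--         t -= parent[t]
--     return combination
-- ===== Notes on version B (the rewrite author's own statement) =====
-- stated objective: alternative
-- what changed: Replaced the memoized top-down recursion plus a separate recurse-requerying reconstruction loop by a single forward bottom-up table of shortest lengths with parent pointers, reconstructing the combination by walking the parents.
import Mathlib
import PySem

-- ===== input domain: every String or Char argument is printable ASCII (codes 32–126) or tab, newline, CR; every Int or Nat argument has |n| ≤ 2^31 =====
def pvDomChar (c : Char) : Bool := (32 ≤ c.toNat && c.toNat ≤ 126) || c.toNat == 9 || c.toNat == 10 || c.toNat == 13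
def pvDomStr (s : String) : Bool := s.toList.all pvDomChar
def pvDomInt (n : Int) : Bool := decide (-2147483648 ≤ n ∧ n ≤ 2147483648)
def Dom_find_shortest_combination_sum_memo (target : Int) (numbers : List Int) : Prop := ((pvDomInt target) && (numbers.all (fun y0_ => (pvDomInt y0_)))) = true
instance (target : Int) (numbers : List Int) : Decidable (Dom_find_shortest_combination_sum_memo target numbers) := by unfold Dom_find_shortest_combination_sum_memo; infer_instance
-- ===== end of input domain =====

-- B replaces A's memoized top-down recursion (plus a reconstruction loop that re-queries the
-- recursion) by a single forward bottom-up table of shortest lengths with parent pointers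
-- (objective: alternative algorithm of similar cost).

-- ===== PORT A =====
-- Python's candidate lengths are ints or float('inf'); modeled as Option Nat with none = inf
-- (exact: every finite length A computes is a nonnegative int).  pyMinOpt is Python's min on
-- these values.
def pyMinOpt (a b : Option Nat) : Option Nat :=
  match a, b with
  | none, b => b
  | some x, none => some x
  | some x, some y => some (min x y)

-- `recurse(target, memo)`, threading the mutated memo dict; fuel is a termination guard only
-- (fuel > target always suffices on the inputs where A terminates).
def recurseA (numbers : List Int) : Nat → Int → PySem.Dict Int (Option Nat) → Option Nat × PySem.Dict Int (Option Nat)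
  | 0, _, memo => (none, memo)
  | fuel+1, t, memo =>
    match memo.get? t with
    | some v => (v, memo)
    | none =>
      if t < 0 then (none, memo)
      else if t = 0 then (some 0, memo)
      else
        let res := numbers.foldl (fun (acc : Option Nat × PySem.Dict Int (Option Nat)) n =>
          let r := recurseA numbers fuel (t - n) acc.2
          (pyMinOpt acc.1 (r.1.map (· + 1)), r.2)) (none, memo)
        (res.1, res.2.insert t res.1)

-- the inner `for number in numbers: if recurse(target-number, memo) == min_length - 1: … break`
-- (ml ≥ 1 whenever this loop runs on an input A terminates on, so Nat subtraction is exact)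
def pickA (numbers : List Int) (t : Int) (ml : Nat) : List Int → PySem.Dict Int (Option Nat) → Option (Int × PySem.Dict Int (Option Nat))
  | [], _ => none
  | n :: rest, memo =>
    let r := recurseA numbers ((t - n).toNat + 1) (t - n) memo
    if r.1 = some (ml - 1) then some (n, r.2) else pickA numbers t ml rest r.2

-- the `while target > 0` reconstruction loop; fuel = target bounds its iterations (each one
-- subtracts a positive number).  When no number matches, Python loops forever; that is never
-- reached on an input A terminates on.
def reconA (numbers : List Int) : Nat → Int → Nat → PySem.Dict Int (Option Nat) → List Int
  | 0, _, _, _ => []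
  | fuel+1, t, ml, memo =>
    if 0 < t then
      match pickA numbers t ml numbers memo with
      | some (n, memo') => n :: reconA numbers fuel (t - n) (ml - 1) memo'
      | none => []
    else []

def find_shortest_combination_sum_memo (target : Int) (numbers : List Int) : Option (List Int) :=
  let r := recurseA numbers (target.toNat + 1) target PySem.Dict.empty
  match r.1 with
  | none => none
  | some ml => some (reconA numbers target.toNat target ml r.2)

-- ===== PORT B =====
-- one step of Source B's outer `for t in range(1, target+1)`: scan numbers, keep the shortest
-- reachable predecessor (first on ties), record the chosen number in `parent`
def fillStepB (numbers : List Int) (len : Array (Option Nat)) (par : Array Int) (t : Int) : Array (Option Nat) × Array Int :=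
  let bp := numbers.foldl (fun (bp : Option Nat × Array Int) num =>
      let s := t - num
      if 0 ≤ s ∧ s < t then
        match len.getD s.toNat none with
        | some ls =>
          match bp.1 with
          | none => (some ls, bp.2.setIfInBounds t.toNat num)
          | some b => if ls < b then (some ls, bp.2.setIfInBounds t.toNat num) else bp
        | none => bp
      else bp) (none, par)
  match bp.1 with
  | some b => (len.setIfInBounds t.toNat (some (b + 1)), bp.2)
  | none => (len, bp.2)

-- Source B's `while t > 0: combination.append(parent[t]); t -= parent[t]`; fuel = target bounds it
def walkB (parent : Array Int) : Nat → Int → List Int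
  | 0, _ => []
  | fuel+1, t =>
    if 0 < t then
      let n := parent.getD t.toNat 0
      n :: walkB parent fuel (t - n)
    else []

def find_shortest_combination_sum_memo_alt (target : Int) (numbers : List Int) : Option (List Int) :=
  if target < 0 then none
  else
    let len0 := (Array.replicate (target.toNat + 1) (none : Option Nat)).setIfInBounds 0 (some 0)
    let par0 := Array.replicate (target.toNat + 1) (0 : Int)
    let lp := (PySem.List.pyRange 1 (target + 1)).foldl
      (fun (lp : Array (Option Nat) × Array Int) t => fillStepB numbers lp.1 lp.2 t) (len0, par0)
    match lp.1.getD target.toNat none with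
    | none => none
    | some _ => some (walkB lp.2 target.toNat target)

-- ===== PRECONDITION & SPEC =====
-- Pre_ excludes exactly the inputs on which A never returns: with target > 0, any
-- non-positive number makes recurse(t, memo) call itself on a no-smaller sub-target
-- forever, so A raises RecursionError instead of returning a value.
def Pre_find_shortest_combination_sum_memo (target : Int) (numbers : List Int) : Prop :=
  0 < target → ∀ n ∈ numbers, 0 < n
instance (target : Int) (numbers : List Int) : Decidable (Pre_find_shortest_combination_sum_memo target numbers) := by unfold Pre_find_shortest_combination_sum_memo; infer_instance

def pvWitness_find_shortest_combination_sum_memo : Int × List Int := (7, [5, 3, 4, 7])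

def Spec_find_shortest_combination_sum_memo (target : Int) (numbers : List Int) (out : Option (List Int)) : Prop := out = find_shortest_combination_sum_memo_alt target numbers
instance (target : Int) (numbers : List Int) (out : Option (List Int)) : Decidable (Spec_find_shortest_combination_sum_memo target numbers out) := by unfold Spec_find_shortest_combination_sum_memo; infer_instance

-- ===== CLAIM (what is proved, stated in full; the proofs are below) =====
def Claim_equal_find_shortest_combination_sum_memo : Prop := ∀ (target : Int) (numbers : List Int), Dom_find_shortest_combination_sum_memo target numbers → Pre_find_shortest_combination_sum_memo target numbers → Spec_find_shortest_combination_sum_memo target numbers (find_shortest_combination_sum_memo target numbers)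


-- ===== LEMMAS AND PROOFS =====

def LF (nums : List Int) : Nat → Int → Option Nat
  | 0, _ => none
  | f+1, t =>
    if t < 0 then none
    else if t = 0 then some 0
    else nums.foldl (fun acc n => pyMinOpt acc ((LF nums f (t - n)).map (· + 1))) none

theorem LF_neg (nums : List Int) : ∀ f : Nat, ∀ t : Int, t < 0 → LF nums f t = none := by
  intro f t h
  cases f with
  | zero => rfl
  | succ e => simp [LF, h]

theorem LF_irrel (nums : List Int) (hpos : ∀ n ∈ nums, 0 < n) :
    ∀ f g : Nat, ∀ t : Int, t < (f : Int) → t < (g : Int) → LF nums f t = LF nums g t := by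
  intro f
  induction f using Nat.strong_induction_on with
  | _ f ih =>
    intro g t hf hg
    by_cases hneg : t < 0
    · rw [LF_neg nums f t hneg, LF_neg nums g t hneg]
    · match f, g with
      | 0, _ => exact absurd hf (by omega)
      | _+1, 0 => exact absurd hg (by omega)
      | e+1, h+1 =>
        simp only [LF, if_neg hneg]
        by_cases h0 : t = 0
        · simp [h0]
        · simp only [if_neg h0]
          refine PySem.List.foldl_congr_mem _ _ _ _ ?_
          intro acc n hn
          have hn1 := hpos n hn
          have : LF nums e (t - n) = LF nums h (t - n) := by
            apply ih e (by omega) h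
            · push_cast at hf ⊢; omega
            · push_cast at hg ⊢; omega
          rw [this]

def L (nums : List Int) (t : Int) : Option Nat := LF nums (t.toNat + 1) t

theorem L_neg (nums : List Int) (t : Int) (h : t < 0) : L nums t = none := LF_neg nums _ t h

theorem L_zero (nums : List Int) : L nums 0 = some 0 := rfl

theorem L_rec (nums : List Int) (hpos : ∀ n ∈ nums, 0 < n) (t : Int) (ht : 0 < t) :
    L nums t = nums.foldl (fun acc n => pyMinOpt acc ((L nums (t - n)).map (· + 1))) none := by
  have htn : (t.toNat : Int) = t := Int.toNat_of_nonneg (by omega)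
  have h1 : L nums t = nums.foldl (fun acc n => pyMinOpt acc ((LF nums t.toNat (t - n)).map (· + 1))) none := by
    show LF nums (t.toNat + 1) t = _
    simp only [LF, if_neg (by omega : ¬ t < 0), if_neg (by omega : ¬ t = 0)]
  rw [h1]
  refine PySem.List.foldl_congr_mem _ _ _ _ ?_
  intro acc n hn
  have hn1 := hpos n hn
  have h2 : LF nums t.toNat (t - n) = L nums (t - n) := by
    apply LF_irrel nums hpos <;> omega
  rw [h2]

def GoodMemo (nums : List Int) (memo : PySem.Dict Int (Option Nat)) : Prop :=
  ∀ k v, memo.get? k = some v → v = L nums k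

theorem GoodMemo_insert (nums : List Int) (memo : PySem.Dict Int (Option Nat)) (k : Int) (v : Option Nat)
    (hg : GoodMemo nums memo) (hv : v = L nums k) : GoodMemo nums (memo.insert k v) := by
  intro k' v' h
  rw [PySem.Dict.get?_insert] at h
  split_ifs at h with he
  · cases h; rw [he]; exact hv
  · exact hg k' v' h

theorem foldA_spec (nums : List Int) (hpos : ∀ n ∈ nums, 0 < n) (f : Nat) (t : Int)
    (htf : t ≤ (f : Int))
    (hrec : ∀ t' memo', t' < (f : Int) → GoodMemo nums memo' →
      (recurseA nums f t' memo').1 = L nums t' ∧ GoodMemo nums (recurseA nums f t' memo').2) :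
    ∀ l : List Int, (∀ n ∈ l, n ∈ nums) → ∀ (acc : Option Nat) memo, GoodMemo nums memo →
      (l.foldl (fun (acc : Option Nat × PySem.Dict Int (Option Nat)) n =>
          let r := recurseA nums f (t - n) acc.2
          (pyMinOpt acc.1 (r.1.map (· + 1)), r.2)) (acc, memo)).1
        = l.foldl (fun a n => pyMinOpt a ((L nums (t - n)).map (· + 1))) acc
      ∧ GoodMemo nums (l.foldl (fun (acc : Option Nat × PySem.Dict Int (Option Nat)) n =>
          let r := recurseA nums f (t - n) acc.2
          (pyMinOpt acc.1 (r.1.map (· + 1)), r.2)) (acc, memo)).2 := by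
  intro l
  induction l with
  | nil => intro _ acc memo hg; exact ⟨rfl, hg⟩
  | cons n rest ih =>
    intro hsub acc memo hg
    have hn := hpos n (hsub n (by simp))
    have hlt : t - n < (f : Int) := by omega
    obtain ⟨h1, h2⟩ := hrec (t - n) memo hlt hg
    simp only [List.foldl_cons]
    have := ih (fun m hm => hsub m (by simp [hm])) (pyMinOpt acc (((recurseA nums f (t - n) memo).1).map (· + 1))) (recurseA nums f (t - n) memo).2 h2
    simpa [h1] using this

theorem recurseA_spec (nums : List Int) (hpos : ∀ n ∈ nums, 0 < n) :
    ∀ f : Nat, ∀ t memo, t < (f : Int) → GoodMemo nums memo →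
      (recurseA nums f t memo).1 = L nums t ∧ GoodMemo nums (recurseA nums f t memo).2 := by
  intro f
  induction f with
  | zero =>
    intro t memo h hg
    exact ⟨(L_neg nums t (by exact_mod_cast h)).symm, hg⟩
  | succ e ih =>
    intro t memo hf hg
    simp only [recurseA]
    cases hm : memo.get? t with
    | some v => exact ⟨hg t v hm, hg⟩
    | none =>
      by_cases hneg : t < 0
      · simp only [if_pos hneg]
        exact ⟨(L_neg nums t hneg).symm, hg⟩
      · by_cases h0 : t = 0
        · simp only [if_neg hneg, if_pos h0]
          subst h0
          exact ⟨(L_zero nums).symm, hg⟩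
        · simp only [if_neg hneg, if_neg h0]
          have ht : 0 < t := by omega
          have hrec : ∀ t' memo', t' < (e : Int) → GoodMemo nums memo' →
              (recurseA nums e t' memo').1 = L nums t' ∧ GoodMemo nums (recurseA nums e t' memo').2 := ih
          have htf : t ≤ (e : Int) := by push_cast at hf; omega
          obtain ⟨h1, h2⟩ := foldA_spec nums hpos e t htf hrec nums (fun _ h => h) none memo hg
          constructor
          · simpa [h1] using (L_rec nums hpos t ht).symm
          · exact GoodMemo_insert nums _ t _ h2 (by rw [h1, L_rec nums hpos t ht])

def G (nums : List Int) : Nat → Int → Nat → List Int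
  | 0, _, _ => []
  | f+1, t, ml =>
    if 0 < t then
      match nums.find? (fun n => L nums (t - n) = some (ml - 1)) with
      | some n => n :: G nums f (t - n) (ml - 1)
      | none => []
    else []

theorem pickA_spec (nums : List Int) (hpos : ∀ n ∈ nums, 0 < n) (t : Int) (ml : Nat) :
    ∀ l memo, GoodMemo nums memo →
      ((pickA nums t ml l memo).map Prod.fst = l.find? (fun n => L nums (t - n) = some (ml - 1))
       ∧ ∀ p, pickA nums t ml l memo = some p → GoodMemo nums p.2) := by
  intro l
  induction l with
  | nil => intro memo hg; exact ⟨rfl, by intro p h; cases h⟩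
  | cons n rest ih =>
    intro memo hg
    have hlt : t - n < (((t - n).toNat + 1 : Nat) : Int) := by
      push_cast; omega
    obtain ⟨h1, h2⟩ := recurseA_spec nums hpos ((t - n).toNat + 1) (t - n) memo hlt hg
    simp only [pickA, List.find?_cons]
    by_cases hc : (recurseA nums ((t - n).toNat + 1) (t - n) memo).1 = some (ml - 1)
    · rw [if_pos hc]
      have : L nums (t - n) = some (ml - 1) := by rw [← h1]; exact hc
      simp only [this, decide_true]
      exact ⟨rfl, by intro p hp; cases hp; exact h2⟩
    · rw [if_neg hc]
      have : ¬ (L nums (t - n) = some (ml - 1)) := by rw [← h1]; exact hc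
      simp only [this, decide_false]
      exact ih _ h2

theorem reconA_eq_G (nums : List Int) (hpos : ∀ n ∈ nums, 0 < n) :
    ∀ f t ml memo, GoodMemo nums memo → reconA nums f t ml memo = G nums f t ml := by
  intro f
  induction f with
  | zero => intro t ml memo _; rfl
  | succ e ih =>
    intro t ml memo hg
    simp only [reconA, G]
    by_cases ht : 0 < t
    · rw [if_pos ht, if_pos ht]
      obtain ⟨h1, h2⟩ := pickA_spec nums hpos t ml nums memo hg
      cases hp : pickA nums t ml nums memo with
      | none =>
        rw [hp] at h1
        simp only [Option.map_none] at h1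
        rw [← h1]
      | some p =>
        rw [hp] at h1
        simp only [Option.map_some] at h1
        rw [← h1]
        obtain ⟨n, memo'⟩ := p
        simp only
        rw [ih (t - n) (ml - 1) memo' (h2 (n, memo') hp)]
    · rw [if_neg ht, if_neg ht]

theorem pyMinOpt_none_right (b : Option Nat) : pyMinOpt b none = b := by cases b <;> rfl

def scanB (len : Array (Option Nat)) (t : Int) (l : List Int) (bp : Option Nat × Array Int) : Option Nat × Array Int :=
  l.foldl (fun (bp : Option Nat × Array Int) num =>
      let s := t - num
      if 0 ≤ s ∧ s < t then
        match len.getD s.toNat none with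
        | some ls =>
          match bp.1 with
          | none => (some ls, bp.2.setIfInBounds t.toNat num)
          | some b => if ls < b then (some ls, bp.2.setIfInBounds t.toNat num) else bp
        | none => bp
      else bp) bp

theorem fillStepB_eq_scan (nums : List Int) (len : Array (Option Nat)) (par : Array Int) (t : Int) :
    fillStepB nums len par t =
      match (scanB len t nums (none, par)).1 with
      | some b => (len.setIfInBounds t.toNat (some (b + 1)), (scanB len t nums (none, par)).2)
      | none => (len, (scanB len t nums (none, par)).2) := by
  unfold fillStepB scanB
  rfl

def ole (a b : Option Nat) : Prop := ∀ k, b = some k → ∃ m, a = some m ∧ m ≤ k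

theorem ole_pyMinOpt_left (b x : Option Nat) : ole (pyMinOpt b x) b := by
  intro k hk
  subst hk
  cases x with
  | none => exact ⟨k, rfl, le_refl k⟩
  | some y => exact ⟨min k y, rfl, Nat.min_le_left k y⟩

theorem ole_trans {a b c : Option Nat} (h1 : ole a b) (h2 : ole b c) : ole a c := by
  intro k hk
  obtain ⟨m, hm, hmk⟩ := h2 k hk
  obtain ⟨m', hm', hmm⟩ := h1 m hm
  exact ⟨m', hm', le_trans hmm hmk⟩

theorem foldMin_ole (g : Int → Option Nat) : ∀ (l : List Int) (b : Option Nat),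
    ole (l.foldl (fun a n => pyMinOpt a (g n)) b) b := by
  intro l
  induction l with
  | nil => intro b k hk; exact ⟨k, hk, le_refl k⟩
  | cons n rest ih =>
    intro b
    exact ole_trans (ih (pyMinOpt b (g n))) (ole_pyMinOpt_left b (g n))

theorem scan_improve (nums : List Int) (t : Int)
    (len : Array (Option Nat)) (n : Int) (rest : List Int)
    (ih : ∀ (b : Option Nat) (parr : Array Int),
      (scanB len t rest (b, parr)).1 = rest.foldl (fun a n => pyMinOpt a (L nums (t - n))) b
      ∧ ((scanB len t rest (b, parr)).1 = b → (scanB len t rest (b, parr)).2 = parr)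
      ∧ ((scanB len t rest (b, parr)).1 ≠ b →
          ∃ m q, (scanB len t rest (b, parr)).1 = some m
            ∧ rest.find? (fun n => L nums (t - n) = some m) = some q
            ∧ (scanB len t rest (b, parr)).2 = parr.setIfInBounds t.toNat q))
    (b : Option Nat) (parr : Array Int) (ls : Nat)
    (hLv : L nums (t - n) = some ls)
    (hkey : ∀ mm, b = some mm → ls < mm) :
    (scanB len t rest (some ls, parr.setIfInBounds t.toNat n)).1
        = (n :: rest).foldl (fun a n => pyMinOpt a (L nums (t - n))) b
      ∧ ((scanB len t rest (some ls, parr.setIfInBounds t.toNat n)).1 = b →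
          (scanB len t rest (some ls, parr.setIfInBounds t.toNat n)).2 = parr)
      ∧ ((scanB len t rest (some ls, parr.setIfInBounds t.toNat n)).1 ≠ b →
          ∃ m q, (scanB len t rest (some ls, parr.setIfInBounds t.toNat n)).1 = some m
            ∧ (n :: rest).find? (fun n => L nums (t - n) = some m) = some q
            ∧ (scanB len t rest (some ls, parr.setIfInBounds t.toNat n)).2 = parr.setIfInBounds t.toNat q) := by
  have hpm : pyMinOpt b (L nums (t - n)) = some ls := by
    rw [hLv]
    cases b with
    | none => rfl
    | some bb => simp [pyMinOpt, Nat.min_eq_right (le_of_lt (hkey bb rfl))]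
  obtain ⟨c1, c2, c3⟩ := ih (some ls) (parr.setIfInBounds t.toNat n)
  have hole : ole (scanB len t rest (some ls, parr.setIfInBounds t.toNat n)).1 (some ls) := by
    rw [c1]; exact foldMin_ole _ rest (some ls)
  obtain ⟨mv, hmv, hmle⟩ := hole ls rfl
  refine ⟨by rw [List.foldl_cons, hpm]; exact c1, fun hb => ?_, fun _ => ?_⟩
  · exfalso
    cases b with
    | none => rw [hmv] at hb; cases hb
    | some bb =>
      rw [hmv] at hb
      injection hb with hb'
      have := hkey bb rfl
      omega
  · by_cases heq : (scanB len t rest (some ls, parr.setIfInBounds t.toNat n)).1 = some ls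
    · exact ⟨ls, n, heq, by rw [List.find?_cons_of_pos (by simp [hLv])], c2 heq⟩
    · obtain ⟨m, q, e1, e2, e3⟩ := c3 heq
      have hm_lt : m < ls := by
        rw [e1] at hmv heq
        injection hmv with hmv'
        have : m ≠ ls := fun hh => heq (by rw [hh])
        omega
      refine ⟨m, q, e1, ?_, ?_⟩
      · rw [List.find?_cons_of_neg (by simp [hLv]; omega)]
        exact e2
      · rw [e3, Array.setIfInBounds_setIfInBounds]

theorem scan_spec (nums : List Int) (hpos : ∀ n ∈ nums, 0 < n) (t : Int)
    (len : Array (Option Nat))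
    (hlen : ∀ s : Int, 0 ≤ s → s < t → len.getD s.toNat none = L nums s) :
    ∀ l : List Int, (∀ n ∈ l, n ∈ nums) → ∀ (b : Option Nat) (parr : Array Int),
      (scanB len t l (b, parr)).1 = l.foldl (fun a n => pyMinOpt a (L nums (t - n))) b
      ∧ ((scanB len t l (b, parr)).1 = b → (scanB len t l (b, parr)).2 = parr)
      ∧ ((scanB len t l (b, parr)).1 ≠ b →
          ∃ m q, (scanB len t l (b, parr)).1 = some m
            ∧ l.find? (fun n => L nums (t - n) = some m) = some q
            ∧ (scanB len t l (b, parr)).2 = parr.setIfInBounds t.toNat q) := by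
  intro l
  induction l with
  | nil =>
    intro _ b parr
    exact ⟨rfl, fun _ => rfl, fun h => absurd rfl h⟩
  | cons n rest ih =>
    intro hsub b parr
    have hn : n ∈ nums := hsub n (by simp)
    have hp := hpos n hn
    have hsubr : ∀ m ∈ rest, m ∈ nums := fun m hm => hsub m (by simp [hm])
    have hst : t - n < t := by omega
    have ih' := ih hsubr
    by_cases hs : 0 ≤ t - n
    case neg =>
      -- guard fails (t - n < 0): head is skipped and L (t - n) = none
      have hLn : L nums (t - n) = none := L_neg nums _ (by omega)
      have hred : scanB len t (n :: rest) (b, parr) = scanB len t rest (b, parr) := by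
        simp only [scanB, List.foldl_cons]
        rw [if_neg (by omega : ¬ (0 ≤ t - n ∧ t - n < t))]
      rw [hred, List.foldl_cons, hLn, pyMinOpt_none_right]
      obtain ⟨c1, c2, c3⟩ := ih' b parr
      refine ⟨c1, c2, fun hne => ?_⟩
      obtain ⟨m, q, e1, e2, e3⟩ := c3 hne
      exact ⟨m, q, e1, by rw [List.find?_cons_of_neg (by simp [hLn])]; exact e2, e3⟩
    case pos =>
      have hL : len.getD (t - n).toNat none = L nums (t - n) := hlen (t - n) hs hst
      cases hLv : L nums (t - n) with
      | none =>
        -- unreachable predecessor: head is skipped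
        have hred : scanB len t (n :: rest) (b, parr) = scanB len t rest (b, parr) := by
          simp only [scanB, List.foldl_cons]
          rw [if_pos (And.intro hs hst), hL, hLv]
        rw [hred, List.foldl_cons, hLv, pyMinOpt_none_right]
        obtain ⟨c1, c2, c3⟩ := ih' b parr
        refine ⟨c1, c2, fun hne => ?_⟩
        obtain ⟨m, q, e1, e2, e3⟩ := c3 hne
        exact ⟨m, q, e1, by rw [List.find?_cons_of_neg (by simp [hLv])]; exact e2, e3⟩
      | some ls =>
        cases b with
        | none =>
          have hred : scanB len t (n :: rest) (none, parr)
              = scanB len t rest (some ls, parr.setIfInBounds t.toNat n) := by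
            simp only [scanB, List.foldl_cons]
            rw [if_pos (And.intro hs hst), hL, hLv]
          rw [hred]
          exact scan_improve nums t len n rest ih' none parr ls hLv (fun mm h => by cases h)
        | some bb =>
          by_cases hlt : ls < bb
          · have hred : scanB len t (n :: rest) (some bb, parr)
                = scanB len t rest (some ls, parr.setIfInBounds t.toNat n) := by
              simp only [scanB, List.foldl_cons]
              rw [if_pos (And.intro hs hst), hL, hLv]
              simp [hlt]
            rw [hred]
            exact scan_improve nums t len n rest ih' (some bb) parr ls hLv
              (fun mm h => by injection h with h'; omega)
          · have hred : scanB len t (n :: rest) (some bb, parr) = scanB len t rest (some bb, parr) := by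
              simp only [scanB, List.foldl_cons]
              rw [if_pos (And.intro hs hst), hL, hLv]
              simp [hlt]
            have hble : bb ≤ ls := Nat.le_of_not_lt hlt
            have hpm : pyMinOpt (some bb) (L nums (t - n)) = some bb := by
              rw [hLv]; simp [pyMinOpt, Nat.min_eq_left hble]
            rw [hred, List.foldl_cons, hpm]
            obtain ⟨c1, c2, c3⟩ := ih' (some bb) parr
            have hole : ole (scanB len t rest (some bb, parr)).1 (some bb) := by
              rw [c1]; exact foldMin_ole _ rest (some bb)
            refine ⟨c1, c2, fun hne => ?_⟩
            obtain ⟨m, q, e1, e2, e3⟩ := c3 hne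
            have hm_lt : m < bb := by
              obtain ⟨mv, hmv, hmle⟩ := hole bb rfl
              rw [e1] at hmv hne
              injection hmv with hmv'
              have : m ≠ bb := fun hh => hne (by rw [hh])
              omega
            refine ⟨m, q, e1, ?_, e3⟩
            rw [List.find?_cons_of_neg (by simp [hLv]; omega)]
            exact e2

theorem pyMinOpt_map_succ (a b : Option Nat) :
    pyMinOpt (a.map (· + 1)) (b.map (· + 1)) = (pyMinOpt a b).map (· + 1) := by
  cases a <;> cases b <;> simp [pyMinOpt, Nat.succ_min_succ]

theorem foldMin_map_succ (g : Int → Option Nat) : ∀ (l : List Int) (b : Option Nat),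
    l.foldl (fun a n => pyMinOpt a ((g n).map (· + 1))) (b.map (· + 1))
      = (l.foldl (fun a n => pyMinOpt a (g n)) b).map (· + 1) := by
  intro l
  induction l with
  | nil => intro b; rfl
  | cons n rest ih =>
    intro b
    simp only [List.foldl_cons]
    rw [pyMinOpt_map_succ]
    exact ih _

theorem L_rec' (nums : List Int) (hpos : ∀ n ∈ nums, 0 < n) (t : Int) (ht : 0 < t) :
    L nums t = (nums.foldl (fun a n => pyMinOpt a (L nums (t - n))) none).map (· + 1) := by
  rw [L_rec nums hpos t ht]
  exact foldMin_map_succ (fun n => L nums (t - n)) nums none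

theorem getD_setIfInBounds {α : Type} (a : Array α) (i j : Nat) (v d : α) :
    (a.setIfInBounds i v).getD j d = if i = j ∧ j < a.size then v else a.getD j d := by
  simp only [Array.getD, Array.size_setIfInBounds]
  split_ifs <;> simp_all

def FillInv (nums : List Int) (T : Nat) (k : Nat) (len : Array (Option Nat)) (par : Array Int) : Prop :=
  len.size = T + 1 ∧ par.size = T + 1
  ∧ (∀ i : Nat, len.getD i none = (if i ≤ k then L nums (i : Int) else none))
  ∧ (∀ i : Nat, 1 ≤ i → i ≤ k → ∀ m : Nat, L nums (i : Int) = some m →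
      nums.find? (fun n => L nums ((i : Int) - n) = some (m - 1)) = some (par.getD i 0))

theorem fillStepB_inv (nums : List Int) (hpos : ∀ n ∈ nums, 0 < n) (T : Nat) (k : Nat)
    (hk : k < T) (len : Array (Option Nat)) (par : Array Int)
    (hinv : FillInv nums T k len par) :
    FillInv nums T (k + 1) (fillStepB nums len par ((k : Int) + 1)).1 (fillStepB nums len par ((k : Int) + 1)).2 := by
  obtain ⟨hs1, hs2, hlen, hpar⟩ := hinv
  set t : Int := (k : Int) + 1 with htdef
  have ht : 0 < t := by omega
  have httn : t.toNat = k + 1 := by omega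
  have hlen' : ∀ s : Int, 0 ≤ s → s < t → len.getD s.toNat none = L nums s := by
    intro s h0 hst
    have h1 : s.toNat ≤ k := by omega
    have hcast : ((s.toNat : Int)) = s := by omega
    rw [hlen s.toNat, if_pos h1, hcast]
  obtain ⟨c1, c2, c3⟩ := scan_spec nums hpos t len hlen' nums (fun _ h => h) none par
  have hLt : L nums t = (scanB len t nums (none, par)).1.map (· + 1) := by
    rw [L_rec' nums hpos t ht, c1]
  cases hM : (scanB len t nums (none, par)).1 with
  | none =>
    -- target t unreachable: nothing is written
    have hunch := c2 hM
    have heval : fillStepB nums len par t = (len, par) := by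
      rw [fillStepB_eq_scan]
      simp only [hM, hunch]
    rw [hM] at hLt
    simp only [Option.map_none] at hLt
    rw [heval]
    refine ⟨hs1, hs2, ?_, ?_⟩
    · intro i
      rw [hlen i]
      by_cases hik : i ≤ k
      · rw [if_pos hik, if_pos (by omega)]
      · rw [if_neg hik]
        by_cases hik1 : i ≤ k + 1
        · have hieq : i = k + 1 := by omega
          rw [if_pos hik1, hieq]
          push_cast [← htdef]
          rw [hLt]
        · rw [if_neg hik1]
    · intro i h1 h2 m hm
      by_cases hik : i ≤ k
      · exact hpar i h1 hik m hm
      · exfalso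
        have hieq : i = k + 1 := by omega
        rw [hieq] at hm
        push_cast [← htdef] at hm
        rw [hLt] at hm
        cases hm
  | some m =>
    have hne : (scanB len t nums (none, par)).1 ≠ none := by rw [hM]; intro h; cases h
    obtain ⟨m', q, e1, e2, e3⟩ := c3 hne
    rw [hM] at e1
    injection e1 with e1'
    subst e1'
    rw [hM] at hLt
    simp only [Option.map_some] at hLt
    have heval : fillStepB nums len par t
        = (len.setIfInBounds t.toNat (some (m + 1)), par.setIfInBounds t.toNat q) := by
      rw [fillStepB_eq_scan]
      simp only [hM, e3]
    rw [heval]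
    refine ⟨by simp [hs1], by simp [hs2], ?_, ?_⟩
    · intro i
      rw [getD_setIfInBounds]
      by_cases hik1 : i = k + 1
      · subst hik1
        rw [if_pos ⟨by omega, by omega⟩, if_pos (by omega)]
        push_cast [← htdef]
        rw [hLt]
      · rw [if_neg (by omega), hlen i]
        by_cases hik : i ≤ k
        · rw [if_pos hik, if_pos (by omega)]
        · rw [if_neg hik, if_neg (by omega)]
    · intro i h1 h2 mm hmm
      rw [getD_setIfInBounds]
      by_cases hik1 : i = k + 1
      · subst hik1
        have hmmv : mm = m + 1 := by
          rw [show ((k + 1 : Nat) : Int) = t by omega] at hmm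
          rw [hLt] at hmm
          injection hmm with h
          omega
        subst hmmv
        rw [if_pos ⟨by omega, by omega⟩]
        rw [show ((k + 1 : Nat) : Int) = t by omega]
        simpa using e2
      · have hik : i ≤ k := by omega
        rw [if_neg (by omega)]
        exact hpar i h1 hik mm hmm

theorem fill_inv (nums : List Int) (hpos : ∀ n ∈ nums, 0 < n) (T : Nat) :
    ∀ K : Nat, K ≤ T →
      FillInv nums T K
        ((PySem.List.pyRange 1 ((K : Int) + 1)).foldl
          (fun (lp : Array (Option Nat) × Array Int) t => fillStepB nums lp.1 lp.2 t)
          ((Array.replicate (T + 1) (none : Option Nat)).setIfInBounds 0 (some 0),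
           Array.replicate (T + 1) (0 : Int))).1
        ((PySem.List.pyRange 1 ((K : Int) + 1)).foldl
          (fun (lp : Array (Option Nat) × Array Int) t => fillStepB nums lp.1 lp.2 t)
          ((Array.replicate (T + 1) (none : Option Nat)).setIfInBounds 0 (some 0),
           Array.replicate (T + 1) (0 : Int))).2 := by
  intro K
  induction K with
  | zero =>
    intro _
    have hempty : PySem.List.pyRange 1 (((0 : Nat) : Int) + 1) = [] := by
      rw [PySem.List.pyRange_one]
      norm_num
    rw [hempty]
    simp only [List.foldl_nil]
    refine ⟨by simp, by simp, ?_, ?_⟩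
    · intro i
      rw [getD_setIfInBounds]
      by_cases hi : i = 0
      · subst hi
        rw [if_pos ⟨rfl, by simp⟩, if_pos (le_refl 0)]
        exact (L_zero nums).symm
      · rw [if_neg (by omega), if_neg (by omega)]
        simp [Array.getD]
    · intro i h1 h2
      omega
  | succ K ih =>
    intro hKT
    have hK := ih (by omega)
    have hsplit : PySem.List.pyRange 1 ((K : Int) + 1 + 1)
        = PySem.List.pyRange 1 ((K : Int) + 1) ++ [(K : Int) + 1] := by
      exact PySem.List.pyRange_one_succ_right (by omega)
    push_cast
    rw [hsplit, List.foldl_append]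
    simpa using fillStepB_inv nums hpos T K (by omega) _ _ hK

theorem walkB_eq_G (nums : List Int) (hpos : ∀ n ∈ nums, 0 < n) (T : Nat) (par : Array Int)
    (hpar : ∀ i : Nat, 1 ≤ i → i ≤ T → ∀ m : Nat, L nums (i : Int) = some m →
      nums.find? (fun n => L nums ((i : Int) - n) = some (m - 1)) = some (par.getD i 0)) :
    ∀ f : Nat, ∀ t : Int, ∀ ml : Nat, 0 ≤ t → t ≤ (T : Int) → L nums t = some ml →
      walkB par f t = G nums f t ml := by
  intro f
  induction f with
  | zero => intro t ml _ _ _; rfl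
  | succ e ih =>
    intro t ml h0 hT hL
    simp only [walkB, G]
    by_cases ht : 0 < t
    · rw [if_pos ht, if_pos ht]
      have hcast : ((t.toNat : Int)) = t := by omega
      have hfind := hpar t.toNat (by omega) (by omega) ml (by rw [hcast]; exact hL)
      rw [hcast] at hfind
      rw [hfind]
      have hqmem : par.getD t.toNat 0 ∈ nums := List.mem_of_find?_eq_some hfind
      have hqpos := hpos _ hqmem
      have hqpred : L nums (t - par.getD t.toNat 0) = some (ml - 1) := by
        have := List.find?_some hfind
        simpa using this
      have hq0 : 0 ≤ t - par.getD t.toNat 0 := by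
        by_contra hc
        rw [L_neg nums _ (by omega)] at hqpred
        cases hqpred
      simp only
      rw [ih (t - par.getD t.toNat 0) (ml - 1) hq0 (by omega) hqpred]
    · rw [if_neg ht, if_neg ht]

theorem portB_canon (nums : List Int) (hpos : ∀ n ∈ nums, 0 < n) (target : Int) :
    find_shortest_combination_sum_memo_alt target nums =
      (match L nums target with
      | none => (none : Option (List Int))
      | some ml => some (G nums target.toNat target ml)) := by
  by_cases hneg : target < 0
  · rw [L_neg nums target hneg]
    unfold find_shortest_combination_sum_memo_alt
    rw [if_pos hneg]
  · have hT : ((target.toNat : Int)) = target := by omega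
    unfold find_shortest_combination_sum_memo_alt
    rw [if_neg hneg]
    simp only
    rw [← hT]
    simp only [Int.toNat_natCast]
    obtain ⟨hs1, hs2, hlen, hpar⟩ := fill_inv nums hpos target.toNat target.toNat (le_refl _)
    rw [hlen target.toNat, if_pos (le_refl _)]
    cases hL : L nums ((target.toNat : Int)) with
    | none => rfl
    | some ml =>
      simp only
      rw [walkB_eq_G nums hpos target.toNat _ hpar target.toNat ((target.toNat : Int)) ml
        (by omega) (by omega) hL]

theorem portA_canon (nums : List Int) (hpos : ∀ n ∈ nums, 0 < n) (target : Int) :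
    find_shortest_combination_sum_memo target nums =
      (match L nums target with
      | none => (none : Option (List Int))
      | some ml => some (G nums target.toNat target ml)) := by
  unfold find_shortest_combination_sum_memo
  have hempty : GoodMemo nums PySem.Dict.empty := by
    intro k v h
    simp [PySem.Dict.get?, PySem.Dict.empty] at h
  have hlt : target < ((target.toNat + 1 : Nat) : Int) := by push_cast; omega
  obtain ⟨h1, h2⟩ := recurseA_spec nums hpos (target.toNat + 1) target PySem.Dict.empty hlt hempty
  simp only [h1]
  cases hL : L nums target with
  | none => simp
  | some ml => simp [reconA_eq_G nums hpos target.toNat target ml _ h2]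

-- the two ports on non-positive targets (no positivity assumption available there)
theorem portA_nonpos (nums : List Int) (target : Int) (h : target ≤ 0) :
    find_shortest_combination_sum_memo target nums = if target < 0 then none else some [] := by
  unfold find_shortest_combination_sum_memo
  have htn : target.toNat = 0 := by omega
  rw [htn]
  by_cases hlt : target < 0
  · rw [if_pos hlt]
    simp [recurseA, PySem.Dict.get?, PySem.Dict.empty, hlt]
  · have h0 : target = 0 := by omega
    subst h0
    rfl

theorem portB_nonpos (nums : List Int) (target : Int) (h : target ≤ 0) :
    find_shortest_combination_sum_memo_alt target nums = if target < 0 then none else some [] := by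
  unfold find_shortest_combination_sum_memo_alt
  by_cases hlt : target < 0
  · rw [if_pos hlt, if_pos hlt]
  · have h0 : target = 0 := by omega
    subst h0
    rfl

-- ===== VERDICT (by name: the statement is the Claim_ definition above) =====
theorem find_shortest_combination_sum_memo_spec : Claim_equal_find_shortest_combination_sum_memo := by
  intro target numbers _ hpre
  unfold Spec_find_shortest_combination_sum_memo
  by_cases ht : 0 < target
  · have hpos : ∀ n ∈ numbers, 0 < n := hpre ht
    rw [portA_canon numbers hpos target, portB_canon numbers hpos target]
  · rw [portA_nonpos numbers target (by omega), portB_nonpos numbers target (by omega)]
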